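-- pv_equiv track=rewrite | github.com/crisdevs/pedigree_automation | main.py | format_pedigree_answer
-- ===== SOURCE A (Python) =====
-- def insertMultiple(arr, index, val, quantity):
--   for i in range(quantity):
--     arr.insert(index, val)
--
-- def format_pedigree_answer(answer):
--   #Seperates pedigree answers into a list
--   pedigree_specs_arr = answer.split(",")
--   final_pedigree_specs_arr = []
--   #This was a quick way I found to remove spaces found at the start of each of the answers returned from chatgpt
--   for i in pedigree_specs_arr:
--         #If the first character was a space in the list
--         if i[0] == " ":
--             #Append the character after the space in the new list which should be the actual start of the answer
--             final_pedigree_specs_arr.append(i[1:])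
--         #If the first character was not a space then just add to the final list
--         else:
--             final_pedigree_specs_arr.append(i)
--   #Add multiple spaces so that answers will be under the right question in excel
--   insertMultiple(final_pedigree_specs_arr, 1, " ", 2)
--   insertMultiple(final_pedigree_specs_arr, 4, " ", 2)
--   insertMultiple(final_pedigree_specs_arr, 19, " ", 11)
--   insertMultiple(final_pedigree_specs_arr, 31, " ", 5)
--   #Make the list into a string again but seperated by tabs(cells) for excel
--   final_pedigree_specs = "\t".join(final_pedigree_specs_arr)
--
--   return final_pedigree_specs
-- ===== SOURCE B (Python) =====
-- def format_pedigree_answer(answer):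
--   # Strip one leading space per field, then build the padded row in a single
--   # slice-concatenation (blank runs at original indices 1, 2, 15, 16) and join.
--   fields = [f[1:] if f.startswith(" ") else f for f in answer.split(",")]
--   padded = (fields[:1] + [" "] * 2 + fields[1:2] + [" "] * 2 +
--             fields[2:15] + [" "] * 11 + fields[15:16] + [" "] * 5 + fields[16:])
--   return "\t".join(padded)
-- ===== Notes on version B (the rewrite author's own statement) =====
-- stated objective: simpler
-- what changed: The four sequential in-place insertMultiple mutations on a growing list are replaced by one declarative slice-concatenation in original-list coordinates (blank runs after original indices 1, 2, 15, 16), and the helper disappears; the leading-space strip uses startswith instead of indexing f[0].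
import Mathlib
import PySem

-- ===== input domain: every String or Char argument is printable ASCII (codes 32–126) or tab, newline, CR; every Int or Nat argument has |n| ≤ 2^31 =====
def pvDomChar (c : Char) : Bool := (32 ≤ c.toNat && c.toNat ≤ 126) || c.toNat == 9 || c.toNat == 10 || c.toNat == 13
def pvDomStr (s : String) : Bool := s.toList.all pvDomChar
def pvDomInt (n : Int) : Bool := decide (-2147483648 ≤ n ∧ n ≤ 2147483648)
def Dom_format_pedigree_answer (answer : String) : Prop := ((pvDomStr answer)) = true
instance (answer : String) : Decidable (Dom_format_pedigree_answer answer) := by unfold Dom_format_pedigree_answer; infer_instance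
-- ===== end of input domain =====

-- B replaces the four in-place insertMultiple mutations by one slice-concatenation
-- built in original-list coordinates (objective: simpler); equal output wherever A returns.

-- ===== PORT A =====
-- insertMultiple(arr, index, val, quantity): quantity times arr.insert(index, val)
def pvInsertMultiple (arr : List String) (index : Int) (val : String) (quantity : Int) : List String :=
  (PySem.List.pyRange 0 quantity 1).foldl (fun a _ => PySem.List.insert a index val) arr

def format_pedigree_answer (answer : String) : String :=
  let pedigree_specs_arr := (PySem.Str.split? answer ",").getD []   -- sep "," ≠ "": split? is some
  -- loop: i[0] == " " raises IndexError on an empty field (pyGet? = none there; excluded by Pre_)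
  let final_pedigree_specs_arr := pedigree_specs_arr.foldl (fun acc i =>
      if PySem.Str.pyGet? i 0 = some ' ' then acc ++ [PySem.Str.slice i (some 1) none]
      else acc ++ [i]) []
  let a1 := pvInsertMultiple final_pedigree_specs_arr 1 " " 2
  let a2 := pvInsertMultiple a1 4 " " 2
  let a3 := pvInsertMultiple a2 19 " " 11
  let a4 := pvInsertMultiple a3 31 " " 5
  PySem.Str.join "\t" a4

-- ===== PORT B =====
def pvStripField (f : String) : String :=
  if PySem.Str.startswith f " " then PySem.Str.slice f (some 1) none else f

def format_pedigree_answer_alt (answer : String) : String :=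
  let fields := ((PySem.Str.split? answer ",").getD []).map pvStripField
  let padded :=
    PySem.List.slice fields none (some 1) ++ List.replicate 2 " " ++
    PySem.List.slice fields (some 1) (some 2) ++ List.replicate 2 " " ++
    PySem.List.slice fields (some 2) (some 15) ++ List.replicate 11 " " ++
    PySem.List.slice fields (some 15) (some 16) ++ List.replicate 5 " " ++
    PySem.List.slice fields (some 16) none
  PySem.Str.join "\t" padded

-- ===== PRECONDITION & SPEC =====
-- Pre_ excludes exactly the inputs with an empty comma-separated field, where A raises
-- IndexError at i[0]; A returns normally everywhere else.
def Pre_format_pedigree_answer (answer : String) : Prop :=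
  ∀ f ∈ (PySem.Str.split? answer ",").getD [], f ≠ ""
instance (answer : String) : Decidable (Pre_format_pedigree_answer answer) := by
  unfold Pre_format_pedigree_answer; infer_instance

def pvWitness_format_pedigree_answer : String := "a, b"

def Spec_format_pedigree_answer (answer : String) (out : String) : Prop := out = format_pedigree_answer_alt answer
instance (answer : String) (out : String) : Decidable (Spec_format_pedigree_answer answer out) := by unfold Spec_format_pedigree_answer; infer_instance

-- ===== CLAIM (what is proved, stated in full; the proofs are below) =====
def Claim_equal_format_pedigree_answer : Prop := ∀ (answer : String), Dom_format_pedigree_answer answer → Pre_format_pedigree_answer answer → Spec_format_pedigree_answer answer (format_pedigree_answer answer)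


-- ===== LEMMAS AND PROOFS =====

-- Python list.insert at a nonnegative index, as take/drop (clamping is absorbed by take/drop).
theorem pv_insert_eq_take_drop {α : Type} (xs : List α) (n : Nat) (v : α) :
    PySem.List.insert xs (n:Int) v = xs.take n ++ v :: xs.drop n := by
  simp [PySem.List.insert, PySem.List.sliceIndices]
  rw [show ((if (n:Int) < 0 then max ((n:Int) + ↑xs.length) 0 else min (n:Int) ↑xs.length)).toNat = min n xs.length by omega]
  by_cases h : n ≤ xs.length
  · rw [Nat.min_eq_left h]
  · rw [Nat.min_eq_right (by omega)]
    simp [List.take_of_length_le (by omega : xs.length ≤ n), List.drop_of_length_le (by omega : xs.length ≤ n)]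

-- one more insert at index n into an already-padded list extends the replicate run
theorem pv_insert_step (arr : List String) (n q : Nat) (v : String) :
    PySem.List.insert (arr.take n ++ (List.replicate q v ++ arr.drop n)) (n:Int) v =
    arr.take n ++ (List.replicate (q+1) v ++ arr.drop n) := by
  rw [pv_insert_eq_take_drop]
  by_cases h : n ≤ arr.length
  · rw [List.take_left' (List.length_take_of_le h), List.drop_left' (List.length_take_of_le h),
        List.replicate_succ]
    simp
  · rw [List.take_of_length_le (by omega : arr.length ≤ n), List.drop_of_length_le (by omega : arr.length ≤ n),
        List.append_nil, List.append_nil, List.take_append, List.drop_append,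
        List.take_of_length_le (by omega), List.drop_of_length_le (by omega),
        List.take_replicate, List.drop_replicate, List.nil_append, List.append_assoc]
    congr 1
    rw [show v :: List.replicate (q - (n - arr.length)) v = List.replicate (1 + (q - (n - arr.length))) v by simp [List.replicate_succ, Nat.add_comm]]
    rw [List.replicate_append_replicate]
    congr 1
    omega

theorem pvInsertMultiple_eq (arr : List String) (n q : Nat) (v : String) :
    pvInsertMultiple arr (n:Int) v (q:Int) = arr.take n ++ (List.replicate q v ++ arr.drop n) := by
  induction q with
  | zero => simp [pvInsertMultiple, PySem.List.pyRange]
  | succ k ih =>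
    unfold pvInsertMultiple at *
    rw [show ((k+1:Nat):Int) = ((k:Nat):Int) + 1 by push_cast; ring,
        PySem.List.pyRange_one_succ_right (by positivity), List.foldl_append, ih]
    simp only [List.foldl_cons, List.foldl_nil]
    exact pv_insert_step arr n k v

-- on a nonempty field, A's i[0] == " " test agrees with B's startswith stripping
theorem pv_strip_elem (f : String) (hf : f ≠ "") :
    (if PySem.Str.pyGet? f 0 = some ' ' then PySem.Str.slice f (some 1) none else f) = pvStripField f := by
  obtain ⟨c, cs, hc⟩ : ∃ c cs, f.toList = c :: cs := by
    cases h : f.toList with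
    | nil => exact absurd (by simpa using congrArg String.ofList h) hf
    | cons c cs => exact ⟨c, cs, rfl⟩
  unfold pvStripField
  congr 1
  simp [pysem, hc, PySem.Chars.startswith, List.isPrefixOf]
  exact eq_comm

theorem pv_strip_fold_eq_map (L : List String) (h : ∀ f ∈ L, f ≠ "") :
    L.foldl (fun acc i =>
      if PySem.Str.pyGet? i 0 = some ' ' then acc ++ [PySem.Str.slice i (some 1) none]
      else acc ++ [i]) [] = L.map pvStripField := by
  rw [show (fun (acc : List String) i =>
      if PySem.Str.pyGet? i 0 = some ' ' then acc ++ [PySem.Str.slice i (some 1) none]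
      else acc ++ [i]) = (fun acc i => acc ++ [if PySem.Str.pyGet? i 0 = some ' '
        then PySem.Str.slice i (some 1) none else i]) from by funext acc i; split <;> rfl]
  rw [PySem.List.foldl_append_singleton_eq_map, List.nil_append]
  exact List.map_congr_left (fun f hf => pv_strip_elem f (h f hf))

-- the four insert runs equal the slice-concatenation, for every list
theorem pv_pipeline (L : List String) :
    pvInsertMultiple (pvInsertMultiple (pvInsertMultiple (pvInsertMultiple L 1 " " 2) 4 " " 2) 19 " " 11) 31 " " 5 =
    L.take 1 ++ List.replicate 2 " " ++ (L.drop 1).take 1 ++ List.replicate 2 " " ++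
    (L.drop 2).take 13 ++ List.replicate 11 " " ++ (L.drop 15).take 1 ++ List.replicate 5 " " ++ L.drop 16 := by
  have e1 : pvInsertMultiple L 1 " " 2 = L.take 1 ++ (List.replicate 2 " " ++ L.drop 1) :=
    by exact_mod_cast pvInsertMultiple_eq L 1 2 " "
  have e2 : ∀ M, pvInsertMultiple M 4 " " 2 = M.take 4 ++ (List.replicate 2 " " ++ M.drop 4) :=
    fun M => by exact_mod_cast pvInsertMultiple_eq M 4 2 " "
  have e3 : ∀ M, pvInsertMultiple M 19 " " 11 = M.take 19 ++ (List.replicate 11 " " ++ M.drop 19) :=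
    fun M => by exact_mod_cast pvInsertMultiple_eq M 19 11 " "
  have e4 : ∀ M, pvInsertMultiple M 31 " " 5 = M.take 31 ++ (List.replicate 5 " " ++ M.drop 31) :=
    fun M => by exact_mod_cast pvInsertMultiple_eq M 31 5 " "
  rw [e1, e2, e3, e4]
  rcases L with _ | ⟨a, L⟩
  · simp
  rcases L with _ | ⟨b, M⟩
  · simp
  simp [List.take_append, List.drop_append]
  by_cases hM : 13 ≤ M.length
  · have ht : (List.take 13 M).length = 13 := by simp [Nat.min_eq_left hM]
    rw [List.take_of_length_le (by omega : (List.take 13 M).length ≤ 25),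
        List.drop_of_length_le (by omega : (List.take 13 M).length ≤ 25),
        Nat.min_eq_left hM]
    norm_num
  · have h1 : List.take 13 M = M := List.take_of_length_le (by omega)
    have h2 : List.drop 13 M = [] := List.drop_of_length_le (by omega)
    have h3 : List.drop 14 M = [] := List.drop_of_length_le (by omega)
    rw [h1, h2, h3, Nat.min_eq_right (by omega : M.length ≤ 13)]
    rw [List.take_of_length_le (by omega : M.length ≤ 25),
        List.drop_of_length_le (by omega : M.length ≤ 25)]
    rw [List.take_of_length_le (by simp; omega)]
    simp [List.drop_of_length_le (show ([" ", " ", " ", " ", " ", " ", " ", " ", " ", " ", " "]:List String).length ≤ 25 - M.length by simp; omega)]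

-- ===== VERDICT (by name: the statement is the Claim_ definition above) =====
set_option maxHeartbeats 1000000 in
theorem format_pedigree_answer_spec : Claim_equal_format_pedigree_answer := by
  intro answer _ hpre
  unfold Spec_format_pedigree_answer format_pedigree_answer format_pedigree_answer_alt
  simp only [pv_strip_fold_eq_map _ hpre]
  rw [pv_pipeline]
  simp [pysem]
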